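-- pv_equiv track=rewrite | github.com/1LStopBudapest/Helper | Binning_BKVal.py | findCR1BinIndexVal2
-- ===== SOURCE A (Python) =====
-- CT_bin = [300, 400, -1]
--
-- MT_bin = [0, 60, 95, 130, -1]
--
-- def findCR1BinIndexVal2(CT, MT, LepChrg):
--     idx = -1
--     pickIdx = -1
--     for j in range(len(MT_bin)-1):
--         cut1 = MT>MT_bin[j] if j == len(MT_bin)-2 else MT>MT_bin[j] and MT<=MT_bin[j+1]
--         cutchrg = LepChrg==-1 if j < len(MT_bin)-3 else True # -1 charge only for first two MT bins
--         for i in range(len(CT_bin)-1):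
--             cut2 = CT>CT_bin[i] if i == len(CT_bin)-2 else CT>CT_bin[i] and CT<=CT_bin[i+1]
--             idx += 1
--             if (cut1 and cut2 and LepChrg):
--                 pickIdx = idx
--                 break
--         else:
--             continue
--         break
--
--     return pickIdx
-- ===== SOURCE B (Python) =====
-- def findCR1BinIndexVal2(CT, MT, LepChrg):
--     if 0 < MT <= 60:
--         mt = 0
--     elif 60 < MT <= 95:
--         mt = 1
--     elif 95 < MT <= 130:
--         mt = 2
--     elif MT > 130:
--         mt = 3
--     else:
--         mt = None
--     if 300 < CT <= 400:
--         ct = 0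
--     elif CT > 400:
--         ct = 1
--     else:
--         ct = None
--     if mt is not None and ct is not None and LepChrg:
--         return mt * 2 + ct
--     return -1
-- ===== Notes on version B (the rewrite author's own statement) =====
-- stated objective: simpler
-- what changed: Replaces the nested loop with shared running counter and double break by two independent range lookups (MT bin, CT bin) combined as mt*2+ct.
import Mathlib
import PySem

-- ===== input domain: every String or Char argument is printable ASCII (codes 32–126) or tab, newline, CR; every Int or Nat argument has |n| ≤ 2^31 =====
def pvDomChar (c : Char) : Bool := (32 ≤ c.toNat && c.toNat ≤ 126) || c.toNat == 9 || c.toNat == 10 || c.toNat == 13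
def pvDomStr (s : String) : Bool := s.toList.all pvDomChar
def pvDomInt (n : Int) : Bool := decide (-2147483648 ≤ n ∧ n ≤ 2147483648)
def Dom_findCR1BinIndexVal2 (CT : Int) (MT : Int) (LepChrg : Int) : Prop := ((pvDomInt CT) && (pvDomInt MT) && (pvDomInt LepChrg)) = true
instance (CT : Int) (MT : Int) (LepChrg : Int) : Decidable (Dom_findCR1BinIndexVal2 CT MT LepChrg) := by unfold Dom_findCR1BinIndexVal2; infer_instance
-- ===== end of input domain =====

-- B replaces A's nested loop with a shared running counter and double break by two
-- independent range lookups combined as mt*2+ct (objective: simpler). Return values only.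

-- ===== PORT A =====
def pvCTbin : List Int := [300, 400, -1]
def pvMTbin : List Int := [0, 60, 95, 130, -1]

-- inner loop: 'for i in range(len(CT_bin)-1)', state idx; returns (idx, some pickIdx) on break
def pvInnerA (cut1 : Bool) (CT LepChrg : Int) : Int → List Nat → Int × Option Int
  | idx, [] => (idx, none)
  | idx, i :: rest =>
    let cut2 : Bool :=
      if i == pvCTbin.length - 2 then decide (CT > pvCTbin.getD i 0)
      else decide (CT > pvCTbin.getD i 0) && decide (CT ≤ pvCTbin.getD (i+1) 0)
    let idx' := idx + 1
    if cut1 && cut2 && (LepChrg != 0) then (idx', some idx')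
    else pvInnerA cut1 CT LepChrg idx' rest

-- outer loop: 'for j in range(len(MT_bin)-1)'; inner break propagates via for/else
def pvOuterA (CT MT LepChrg : Int) : Int → Int → List Nat → Int
  | _, pickIdx, [] => pickIdx
  | idx, pickIdx, j :: rest =>
    let cut1 : Bool :=
      if j == pvMTbin.length - 2 then decide (MT > pvMTbin.getD j 0)
      else decide (MT > pvMTbin.getD j 0) && decide (MT ≤ pvMTbin.getD (j+1) 0)
    -- cutchrg is computed in A but never used; omitted as a pure value
    match pvInnerA cut1 CT LepChrg idx (List.range (pvCTbin.length - 1)) with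
    | (_, some p) => p
    | (idx', none) => pvOuterA CT MT LepChrg idx' pickIdx rest

def findCR1BinIndexVal2 (CT : Int) (MT : Int) (LepChrg : Int) : Int :=
  pvOuterA CT MT LepChrg (-1) (-1) (List.range (pvMTbin.length - 1))

-- ===== PORT B =====
def findCR1BinIndexVal2_alt (CT : Int) (MT : Int) (LepChrg : Int) : Int :=
  let mt : Option Int :=
    if 0 < MT ∧ MT ≤ 60 then some 0
    else if 60 < MT ∧ MT ≤ 95 then some 1
    else if 95 < MT ∧ MT ≤ 130 then some 2
    else if MT > 130 then some 3
    else none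
  let ct : Option Int :=
    if 300 < CT ∧ CT ≤ 400 then some 0
    else if CT > 400 then some 1
    else none
  match mt, ct with
  | some m, some c => if LepChrg ≠ 0 then m * 2 + c else -1
  | _, _ => -1

-- ===== PRECONDITION & SPEC =====
def Spec_findCR1BinIndexVal2 (CT : Int) (MT : Int) (LepChrg : Int) (out : Int) : Prop := out = findCR1BinIndexVal2_alt CT MT LepChrg
instance (CT : Int) (MT : Int) (LepChrg : Int) (out : Int) : Decidable (Spec_findCR1BinIndexVal2 CT MT LepChrg out) := by unfold Spec_findCR1BinIndexVal2; infer_instance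

-- ===== CLAIM (what is proved, stated in full; the proofs are below) =====
def Claim_equal_findCR1BinIndexVal2 : Prop := ∀ (CT : Int) (MT : Int) (LepChrg : Int), Dom_findCR1BinIndexVal2 CT MT LepChrg → Spec_findCR1BinIndexVal2 CT MT LepChrg (findCR1BinIndexVal2 CT MT LepChrg)

-- ===== LEMMAS AND PROOFS =====

theorem pvInnerA_eq (c : Bool) (CT L idx : Int) :
    pvInnerA c CT L idx [0, 1] =
      if c = true ∧ 300 < CT ∧ CT ≤ 400 ∧ L ≠ 0 then (idx + 1, some (idx + 1))
      else if c = true ∧ 400 < CT ∧ L ≠ 0 then (idx + 1 + 1, some (idx + 1 + 1))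
      else (idx + 1 + 1, none) := by
  cases c <;> simp [pvInnerA, pvCTbin] <;> split_ifs <;> simp_all <;> omega

set_option maxHeartbeats 1000000 in
theorem findCR1BinIndexVal2_spec : Claim_equal_findCR1BinIndexVal2 := by
  intro CT MT LepChrg _
  unfold Spec_findCR1BinIndexVal2 findCR1BinIndexVal2 findCR1BinIndexVal2_alt
  have h1 : List.range (pvMTbin.length - 1) = [0, 1, 2, 3] := by decide
  have h2 : List.range (pvCTbin.length - 1) = [0, 1] := by decide
  rw [h1]; clear h1
  rcases (show MT ≤ 0 ∨ (0 < MT ∧ MT ≤ 60) ∨ (60 < MT ∧ MT ≤ 95) ∨ (95 < MT ∧ MT ≤ 130) ∨ 130 < MT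
    by omega) with h | ⟨p, q⟩ | ⟨p, q⟩ | ⟨p, q⟩ | h
  · have e0 : ¬ ((0:Int) < MT) := by omega
    have e1 : ¬ ((60:Int) < MT) := by omega
    have e2 : ¬ ((95:Int) < MT) := by omega
    have e3 : ¬ ((130:Int) < MT) := by omega
    simp [pvOuterA, pvInnerA_eq, h2, pvMTbin, e0, e1, e2, e3]
  · have e1 : ¬ ((60:Int) < MT) := by omega
    have e2 : ¬ ((95:Int) < MT) := by omega
    have e3 : ¬ ((130:Int) < MT) := by omega
    simp [pvOuterA, pvInnerA_eq, h2, pvMTbin, p, q, e1, e2, e3]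
    split_ifs <;> simp_all
  · have e2 : ¬ ((95:Int) < MT) := by omega
    have e3 : ¬ ((130:Int) < MT) := by omega
    have q' : ¬ (MT ≤ 60) := by omega
    simp [pvOuterA, pvInnerA_eq, h2, pvMTbin, p, q, q', e2, e3]
    split_ifs <;> simp_all
  · have e3 : ¬ ((130:Int) < MT) := by omega
    have q1 : ¬ (MT ≤ 60) := by omega
    have q2 : ¬ (MT ≤ 95) := by omega
    simp [pvOuterA, pvInnerA_eq, h2, pvMTbin, p, q, q1, q2, e3]
    split_ifs <;> simp_all
  · have q1 : ¬ (MT ≤ 60) := by omega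
    have q2 : ¬ (MT ≤ 95) := by omega
    have q3 : ¬ (MT ≤ 130) := by omega
    simp [pvOuterA, pvInnerA_eq, h2, pvMTbin, h, q1, q2, q3]
    split_ifs <;> simp_all
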